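-- pv_equiv track=rewrite | github.com/chazeon/docxlate | src/docxlate/bbl.py | _read_braced
-- ===== SOURCE A (Python) =====
-- def _is_escaped(text: str, idx: int) -> bool:
--     backslashes = 0
--     j = idx - 1
--     while j >= 0 and text[j] == "\\":
--         backslashes += 1
--         j -= 1
--     return (backslashes % 2) == 1
--
-- def _skip_ws(text: str, i: int) -> int:
--     while i < len(text) and text[i].isspace():
--         i += 1
--     return i
--
-- def _read_braced(text: str, i: int) -> tuple[str, int]:
--     i = _skip_ws(text, i)
--     if i >= len(text) or text[i] != "{":
--         return "", i
--     depth = 0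
--     i += 1
--     start = i
--     while i < len(text):
--         ch = text[i]
--         if ch == "{" and not _is_escaped(text, i):
--             depth += 1
--         elif ch == "}" and not _is_escaped(text, i):
--             if depth == 0:
--                 return text[start:i], i + 1
--             depth -= 1
--         i += 1
--     return text[start:], len(text)
-- ===== SOURCE B (Python) =====
-- def _read_braced(text: str, i: int) -> tuple[str, int]:
--     n = len(text)
--     if i >= n:
--         return "", i
--     tail = text[i:]
--     j = i + (len(tail) - len(tail.lstrip()))
--     if j >= n or text[j] != "{":
--         return "", j
--     buf = []
--     depth = 0
--     escaped = False
--     for k in range(j + 1, n):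
--         ch = text[k]
--         if not escaped:
--             if ch == "}":
--                 if depth == 0:
--                     return "".join(buf), k + 1
--                 depth -= 1
--             elif ch == "{":
--                 depth += 1
--         buf.append(ch)
--         escaped = (ch == "\\") and not escaped
--     return "".join(buf), n
-- ===== Notes on version B (the rewrite author's own statement) =====
-- stated objective: alternative
-- what changed: B replaces A's index-walk with its _is_escaped backward backslash re-scans by one structural forward pass that carries a running escaped flag and accumulates the output characters in a buffer (no slicing), and skips leading whitespace via lstrip instead of A's index loop.
-- outside the precondition, e.g. on _read_braced('{a\\}b}', -6): A returns ('a\\', -2), B returns ('a\\}b', 0); on _read_braced('a{b}', -9): A raises IndexError, B raises IndexError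
import Mathlib
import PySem

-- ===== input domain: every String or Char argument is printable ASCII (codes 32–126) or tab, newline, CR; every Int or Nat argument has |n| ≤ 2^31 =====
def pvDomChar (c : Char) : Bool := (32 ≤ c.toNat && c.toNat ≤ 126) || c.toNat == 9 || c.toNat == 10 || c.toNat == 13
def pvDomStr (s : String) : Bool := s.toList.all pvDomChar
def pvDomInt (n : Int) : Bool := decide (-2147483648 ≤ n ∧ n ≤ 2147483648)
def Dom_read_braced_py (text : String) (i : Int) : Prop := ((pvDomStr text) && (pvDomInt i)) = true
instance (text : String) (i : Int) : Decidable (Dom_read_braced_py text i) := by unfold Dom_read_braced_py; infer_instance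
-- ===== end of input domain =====

-- B replaces A's index-walk with _is_escaped backward re-scans by a single structural pass over
-- the tail that carries a running escape flag and ACCUMULATES the output characters (simpler,
-- no backward scans, no slicing), and skips leading whitespace with lstrip instead of a loop.

-- ===== PORT A =====
-- _skip_ws: `while i < len(text) and text[i].isspace(): i += 1`
def pvSkipWs (l : List Char) (i : Nat) : Nat :=
  if h : i < l.length then
    if PySem.Chars.isspace l[i] then pvSkipWs l (i + 1) else i
  else i
termination_by l.length - i

-- _is_escaped: count the backslashes immediately before idx (backward while-loop as structural recursion on idx)
def pvAuxBack (l : List Char) : Nat → Nat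
  | 0 => 0
  | n + 1 => if l[n]? == some '\\' then pvAuxBack l n + 1 else 0

def pvIsEscaped (l : List Char) (idx : Nat) : Bool := pvAuxBack l idx % 2 == 1

-- A's main while-loop; text[start:i] with 0 ≤ start ≤ i is exactly (drop start).take (i - start)
def pvLoopA (l : List Char) (start : Nat) (depth : Int) (i : Nat) : String × Int :=
  if h : i < l.length then
    let ch := l[i]
    if ch == '{' && !pvIsEscaped l i then pvLoopA l start (depth + 1) (i + 1)
    else if ch == '}' && !pvIsEscaped l i then
      if depth == 0 then (String.ofList ((l.drop start).take (i - start)), (i : Int) + 1)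
      else pvLoopA l start (depth - 1) (i + 1)
    else pvLoopA l start depth (i + 1)
  else (String.ofList (l.drop start), (l.length : Int))
termination_by l.length - i

def read_braced_py (text : String) (i : Int) : String × Int :=
  let l := text.toList
  let j := pvSkipWs l i.toNat
  if h : j < l.length then
    if l[j] == '{' then pvLoopA l (j + 1) 0 (j + 1) else ("", (j : Int))
  else ("", (j : Int))

-- ===== PORT B =====
-- B's for-loop: structural recursion over the remaining characters, accumulating buf (reversed)
-- and the running escape flag; k is the current index (for the `k + 1` return).
def pvLoopB (rest : List Char) (depth : Int) (escaped : Bool) (acc : List Char) (k : Nat) : String × Int :=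
  match rest with
  | [] => (String.ofList acc.reverse, (k : Int))          -- `"".join(buf), n` (rest exhausted ⇒ k = n)
  | ch :: rs =>
    if !escaped && ch == '}' then
      if depth == 0 then (String.ofList acc.reverse, (k : Int) + 1)
      else pvLoopB rs (depth - 1) ((ch == '\\') && !escaped) (ch :: acc) (k + 1)
    else if !escaped && ch == '{' then
      pvLoopB rs (depth + 1) ((ch == '\\') && !escaped) (ch :: acc) (k + 1)
    else pvLoopB rs depth ((ch == '\\') && !escaped) (ch :: acc) (k + 1)

def read_braced_py_alt (text : String) (i : Int) : String × Int :=
  let l := text.toList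
  if (l.length : Int) ≤ i then ("", i)                    -- `if i >= n: return "", i`
  else
    let tail := PySem.List.slice l (some i) none          -- text[i:]
    -- `j = i + (len(tail) - len(tail.lstrip()))`; under Pre_ (0 ≤ i) the i + … is i.toNat + …
    let j := i.toNat + (tail.length - (PySem.Chars.lstrip tail).length)
    if l.length ≤ j then ("", (j : Int))                  -- `if j >= n or text[j] != "{"` (short-circuit)
    else if PySem.List.pyGet? l (j : Int) != some '{' then ("", (j : Int))
    else pvLoopB (l.drop (j + 1)) 0 false [] (j + 1)

-- ===== PRECONDITION & SPEC =====
-- Pre_ excludes negative i, which is outside the natural domain of this parser: there Python's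
-- negative-index wraparound takes over (IndexError for i < -len, and for -len ≤ i < 0 accidental
-- wrapped reads/slices on which neither program's value is specified).
def Pre_read_braced_py (text : String) (i : Int) : Prop := 0 ≤ i
instance (text : String) (i : Int) : Decidable (Pre_read_braced_py text i) := by unfold Pre_read_braced_py; infer_instance
def pvWitness_read_braced_py : String × Int := ("{a}", 0)

def Spec_read_braced_py (text : String) (i : Int) (out : String × Int) : Prop := out = read_braced_py_alt text i
instance (text : String) (i : Int) (out : String × Int) : Decidable (Spec_read_braced_py text i out) := by unfold Spec_read_braced_py; infer_instance

-- ===== CLAIM =====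
def Claim_equal_read_braced_py : Prop := ∀ (text : String) (i : Int), Dom_read_braced_py text i → Pre_read_braced_py text i → Spec_read_braced_py text i (read_braced_py text i)

-- ===== LEMMAS AND PROOFS =====

-- running-flag step: the escape parity at i+1 is determined by the character at i and the parity at i
lemma pvIsEscaped_succ (l : List Char) (i : Nat) (h : i < l.length) :
    pvIsEscaped l (i + 1) = ((l[i] == '\\') && !pvIsEscaped l i) := by
  have hg : l[i]? = some l[i] := List.getElem?_eq_getElem h
  by_cases hc : l[i] = '\\'
  · have : pvAuxBack l (i + 1) = pvAuxBack l i + 1 := by simp [pvAuxBack, hg, hc]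
    rcases Nat.mod_two_eq_zero_or_one (pvAuxBack l i) with h2 | h2 <;>
      simp [pvIsEscaped, this, Nat.add_mod, h2, hc]
  · have : pvAuxBack l (i + 1) = 0 := by simp [pvAuxBack, hg, hc]
    simp [pvIsEscaped, this, hc]

-- A's whitespace loop computed as the length of the whitespace prefix of the tail
lemma pvSkipWs_eq (l : List Char) : ∀ (n m : Nat), l.length - m ≤ n →
    pvSkipWs l m = m + ((l.drop m).takeWhile PySem.Chars.isspace).length := by
  intro n
  induction n with
  | zero =>
    intro m hn
    have hm : ¬ m < l.length := by omega
    rw [pvSkipWs]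
    simp [hm, List.drop_eq_nil_of_le (by omega : l.length ≤ m)]
  | succ n ih =>
    intro m hn
    by_cases hm : m < l.length
    · have hdrop : l.drop m = l[m] :: l.drop (m + 1) := List.drop_eq_getElem_cons hm
      by_cases hs : PySem.Chars.isspace l[m]
      · rw [pvSkipWs, dif_pos hm, if_pos hs, ih (m + 1) (by omega), hdrop,
          List.takeWhile_cons_of_pos hs, List.length_cons]
        omega
      · rw [pvSkipWs, dif_pos hm, if_neg hs, hdrop, List.takeWhile_cons_of_neg hs]
        simp
    · rw [pvSkipWs]
      simp [hm, List.drop_eq_nil_of_le (by omega : l.length ≤ m)]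

-- one step of the slice A returns: take one more character
lemma pvTake_succ (l : List Char) (start i : Nat) (hsi : start ≤ i) (h : i < l.length) :
    (l.drop start).take (i + 1 - start) = (l.drop start).take (i - start) ++ [l[i]] := by
  have h1 : i + 1 - start = (i - start) + 1 := by omega
  have h2 : (l.drop start)[i - start]? = some l[i] := by
    rw [List.getElem?_drop]
    have : start + (i - start) = i := by omega
    rw [this, List.getElem?_eq_getElem h]
  rw [h1, List.take_succ, h2]
  rfl

-- B's accumulator pass on the tail equals A's index walk
lemma pvLoop_eq (l : List Char) (start : Nat) :
    ∀ (n i : Nat) (esc : Bool) (acc : List Char), l.length - i ≤ n → start ≤ i → i ≤ l.length →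
      acc = ((l.drop start).take (i - start)).reverse → esc = pvIsEscaped l i → ∀ (d : Int),
      pvLoopB (l.drop i) d esc acc i = pvLoopA l start d i := by
  intro n
  induction n with
  | zero =>
    intro i esc acc hn hsi hil hacc hesc d
    have hi : ¬ i < l.length := by omega
    have hieq : i = l.length := by omega
    rw [pvLoopA]
    simp only [hi, dif_neg, not_false_iff]
    rw [List.drop_eq_nil_of_le (le_of_eq hieq.symm), pvLoopB, hacc]
    have : (l.drop start).take (i - start) = l.drop start := by
      apply List.take_of_length_le
      rw [List.length_drop]; omega
    rw [this, List.reverse_reverse, hieq]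
  | succ n ih =>
    intro i esc acc hn hsi hil hacc hesc d
    subst hesc
    by_cases hi : i < l.length
    · have hdrop : l.drop i = l[i] :: l.drop (i + 1) := List.drop_eq_getElem_cons hi
      rw [pvLoopA, hdrop, pvLoopB]
      simp only [hi, dif_pos]
      have hesc' : ((l[i] == '\\') && !pvIsEscaped l i) = pvIsEscaped l (i + 1) :=
        (pvIsEscaped_succ l i hi).symm
      have hacc' : l[i] :: acc = ((l.drop start).take (i + 1 - start)).reverse := by
        rw [pvTake_succ l start i hsi hi, List.reverse_append, hacc]; rfl
      have hret : acc.reverse = (l.drop start).take (i - start) := by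
        rw [hacc, List.reverse_reverse]
      by_cases he : pvIsEscaped l i
      · -- escaped: both sides fall through to the plain-advance branch
        have hescT : (false : Bool) = pvIsEscaped l (i + 1) := by
          rw [← hesc', he]; simp
        simp only [he, Bool.not_true, Bool.false_and, Bool.and_false, if_neg,
          Bool.false_eq_true, not_false_iff, if_false]
        exact ih (i + 1) _ _ (by omega) (by omega) (by omega) hacc' hescT d
      · have heF : pvIsEscaped l i = false := by simp [he]
        have hescF : (l[i] == '\\') = pvIsEscaped l (i + 1) := by
          rw [← hesc', heF]; simp
        by_cases hcb : l[i] = '}'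
        · have hob : (l[i] == '{') = false := by rw [hcb]; decide
          simp only [heF, Bool.not_false, Bool.true_and, Bool.and_true, hcb,
            beq_self_eq_true, if_true, hob, Bool.false_eq_true, if_false]
          by_cases hd : d = 0
          · subst hd
            simp only [beq_self_eq_true, if_true, hret,
              (by decide : ('}' == '{') = false), Bool.false_eq_true, if_false]
          · have hD : (d == 0) = false := by simp [hd]
            simp only [hD, Bool.false_eq_true, if_false,
              (by decide : ('}' == '{') = false)]
            exact ih (i + 1) _ _ (by omega) (by omega) (by omega)
              (hcb ▸ hacc') (hcb ▸ hescF) (d - 1)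
        · have h2 : (l[i] == '}') = false := by simp [hcb]
          by_cases hob : l[i] = '{'
          · simp only [heF, Bool.not_false, Bool.true_and, Bool.and_true, hob,
              beq_self_eq_true, if_true, h2, Bool.false_eq_true, if_false,
              (by decide : ('{' == '}') = false)]
            exact ih (i + 1) _ _ (by omega) (by omega) (by omega)
              (hob ▸ hacc') (hob ▸ hescF) (d + 1)
          · have h1 : (l[i] == '{') = false := by simp [hob]
            simp only [heF, Bool.not_false, Bool.true_and, Bool.and_true, h1, h2,
              Bool.false_eq_true, if_false]
            exact ih (i + 1) _ _ (by omega) (by omega) (by omega) hacc' hescF d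
    · have hieq : i = l.length := by omega
      rw [pvLoopA]
      simp only [hi, dif_neg, not_false_iff]
      rw [List.drop_eq_nil_of_le (le_of_eq hieq.symm), pvLoopB, hacc]
      have : (l.drop start).take (i - start) = l.drop start := by
        apply List.take_of_length_le
        rw [List.length_drop]; omega
      rw [this, List.reverse_reverse, hieq]

-- ===== VERDICT =====
theorem read_braced_py_spec : Claim_equal_read_braced_py := by
  intro text i _hdom hpre
  unfold Spec_read_braced_py read_braced_py read_braced_py_alt
  have hi : ((i.toNat : Nat) : Int) = i := Int.toNat_of_nonneg hpre
  generalize text.toList = l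
  set m := i.toNat with hm
  by_cases hlen : (l.length : Int) ≤ i
  · -- i ≥ n: A's skip loop does nothing, both return ("", i)
    have hmn : ¬ m < l.length := by omega
    have hsk : pvSkipWs l m = m := by
      rw [pvSkipWs_eq l l.length m (by omega),
        List.drop_eq_nil_of_le (by omega : l.length ≤ m)]
      simp
    simp only [hsk, hmn, dif_neg, not_false_iff, if_pos hlen, hi]
  · simp only [if_neg hlen]
    have hmlt : m < l.length := by omega
    -- B's lstrip-based j equals A's pvSkipWs
    have htail : PySem.List.slice l (some i) none = l.drop m := by
      rw [← hi]; exact PySem.List.slice_from_natCast l m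
    have hlstrip : PySem.Chars.lstrip (l.drop m) = (l.drop m).dropWhile PySem.Chars.isspace := by
      simp [PySem.Chars.lstrip]
    have hlen2 : ((l.drop m).takeWhile PySem.Chars.isspace).length
        + ((l.drop m).dropWhile PySem.Chars.isspace).length = (l.drop m).length := by
      rw [← List.length_append, List.takeWhile_append_dropWhile]
    have hdw : ((l.drop m).dropWhile PySem.Chars.isspace).length ≤ (l.drop m).length := by omega
    have hj : m + ((l.drop m).length - (PySem.Chars.lstrip (l.drop m)).length) = pvSkipWs l m := by
      rw [hlstrip, pvSkipWs_eq l (l.length - m) m (by omega)]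
      omega
    rw [htail, hlstrip]
    have hjval : m + ((l.drop m).length - ((l.drop m).dropWhile PySem.Chars.isspace).length)
        = pvSkipWs l m := by rw [← hj, hlstrip]
    rw [hjval]
    set j := pvSkipWs l m with hjdef
    by_cases hjl : j < l.length
    · have hget : PySem.List.pyGet? l (j : Int) = some l[j] := by
        rw [PySem.List.pyGet?_natCast]
        exact List.getElem?_eq_getElem hjl
      simp only [dif_pos hjl, if_neg (by omega : ¬ l.length ≤ j), hget]
      by_cases hbrace : l[j] = '{'
      · have : (some l[j] != some '{') = false := by simp [hbrace]
        simp only [hbrace, beq_self_eq_true, if_true, this, Bool.false_eq_true, if_false]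
        have hesc0 : (false : Bool) = pvIsEscaped l (j + 1) := by
          have hg : l[j]? = some l[j] := List.getElem?_eq_getElem hjl
          simp [pvIsEscaped, pvAuxBack, hg, hbrace]
        exact (pvLoop_eq l (j + 1) (l.length - (j + 1)) (j + 1) false [] (by omega) (le_refl _)
          (by omega) (by simp) hesc0 0).symm
      · have h1 : (l[j] == '{') = false := by simp [hbrace]
        have h2 : (some l[j] != some '{') = true := by simp [hbrace]
        simp [h1, h2]
    · have hjn : l.length ≤ j := by omega
      simp [dif_neg hjl, if_pos hjn]
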